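-- pv_equiv track=rewrite | github.com/usangbong/Data-Visualization-Lab-RND | gaze_project/gazeBehavior/ver_6/app.py | getIntersection
-- ===== SOURCE A (Python) =====
-- def getIntersection(_f1, _f2):
--   _iCount = 0
--   for _p in _f1:
--     _xp = _p[0]
--     _yp = _p[1]
--     for _f in _f2:
--       _xf = _f[0]
--       _yf = _f[1]
--       if _xp == _xf and _yp == _yf:
--         _iCount += 1
--   return _iCount
-- ===== SOURCE B (Python) =====
-- def getIntersection(_f1, _f2):
--   counts = {}
--   for _f in _f2:
--     key = (_f[0], _f[1])
--     counts[key] = counts.get(key, 0) + 1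
--   total = 0
--   for _p in _f1:
--     total += counts.get((_p[0], _p[1]), 0)
--   return total
-- ===== Notes on version B (the rewrite author's own statement) =====
-- stated objective: faster
-- what changed: Replaced the nested O(n*m) scan with a single dict pass counting _f2's points and one pass over _f1 summing lookups.
import Mathlib
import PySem

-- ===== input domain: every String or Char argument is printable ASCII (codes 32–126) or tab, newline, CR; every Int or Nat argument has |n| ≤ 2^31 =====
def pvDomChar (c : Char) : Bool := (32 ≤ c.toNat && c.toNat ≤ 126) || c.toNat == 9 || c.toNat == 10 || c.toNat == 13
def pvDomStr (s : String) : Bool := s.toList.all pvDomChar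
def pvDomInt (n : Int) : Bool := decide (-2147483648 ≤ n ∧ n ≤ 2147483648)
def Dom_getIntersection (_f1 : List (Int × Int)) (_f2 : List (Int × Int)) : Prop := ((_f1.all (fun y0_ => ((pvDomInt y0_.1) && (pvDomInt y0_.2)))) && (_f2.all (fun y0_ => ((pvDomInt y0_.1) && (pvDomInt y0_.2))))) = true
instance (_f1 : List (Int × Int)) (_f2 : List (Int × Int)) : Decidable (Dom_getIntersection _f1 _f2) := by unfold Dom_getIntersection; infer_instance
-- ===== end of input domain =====

-- B replaces A's nested O(n*m) scan by one counting-dict pass over _f2 and one lookup pass over _f1 (faster, asymptotic).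


-- ===== PORT A =====
-- literal port of A: for each _p in _f1, scan all of _f2 and bump the counter on a coordinate match
def getIntersection (_f1 : List (Int × Int)) (_f2 : List (Int × Int)) : Int :=
  _f1.foldl (fun _iCount _p =>
    _f2.foldl (fun acc _f => if _p.1 == _f.1 && _p.2 == _f.2 then acc + 1 else acc) _iCount) 0

-- ===== PORT B =====
-- Source B's first loop: build the counting dict over _f2
def pvCounts (_f2 : List (Int × Int)) : PySem.Dict (Int × Int) Int :=
  _f2.foldl (fun counts _f => counts.insert (_f.1, _f.2) (counts.getD (_f.1, _f.2) 0 + 1)) PySem.Dict.empty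

-- Source B's second loop: sum the lookups over _f1
def getIntersection_alt (_f1 : List (Int × Int)) (_f2 : List (Int × Int)) : Int :=
  _f1.foldl (fun total _p => total + (pvCounts _f2).getD (_p.1, _p.2) 0) 0

-- ===== PRECONDITION & SPEC =====
def Spec_getIntersection (_f1 : List (Int × Int)) (_f2 : List (Int × Int)) (out : Int) : Prop := out = getIntersection_alt _f1 _f2
instance (_f1 : List (Int × Int)) (_f2 : List (Int × Int)) (out : Int) : Decidable (Spec_getIntersection _f1 _f2 out) := by unfold Spec_getIntersection; infer_instance

-- ===== CLAIM (what is proved, stated in full; the proofs are below) =====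
def Claim_equal_getIntersection : Prop := ∀ (_f1 : List (Int × Int)) (_f2 : List (Int × Int)), Dom_getIntersection _f1 _f2 → Spec_getIntersection _f1 _f2 (getIntersection _f1 _f2)

-- ===== LEMMAS AND PROOFS =====

-- A's inner scan over _f2 adds exactly the number of occurrences of _p in _f2
theorem pvInner_eq_count (l : List (Int × Int)) (p : Int × Int) (a : Int) :
    l.foldl (fun acc f => if p.1 == f.1 && p.2 == f.2 then acc + 1 else acc) a = a + (l.count p : Int) := by
  have hf : List.filter (fun x => p.1 == x.1 && p.2 == x.2) l = List.filter (· == p) l := by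
    apply List.filter_congr
    intro x _
    rw [Bool.eq_iff_iff]
    simp only [Bool.and_eq_true, beq_iff_eq, Prod.ext_iff]
    constructor
    · rintro ⟨h1, h2⟩; exact ⟨h1.symm, h2.symm⟩
    · rintro ⟨h1, h2⟩; exact ⟨h1.symm, h2.symm⟩
  simp only [pysem, List.count_eq_length_filter, mul_one, hf]

-- B's dict lookup is exactly the number of occurrences in _f2
theorem pvCounts_getD (l : List (Int × Int)) (v : Int × Int) :
    (pvCounts l).getD v 0 = (l.count v : Int) := by
  unfold pvCounts
  simp only [Prod.mk.eta]
  rw [PySem.Dict.foldl_insert_getD_add_one_eq_counter, PySem.Dict.getD_counter]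

-- ===== VERDICT (by name: the statement is the Claim_ definition above) =====
theorem getIntersection_spec : Claim_equal_getIntersection := by
  intro _f1 _f2 _
  unfold Spec_getIntersection getIntersection getIntersection_alt
  have hstep : (fun (acc : Int) (p : Int × Int) =>
        _f2.foldl (fun acc f => if p.1 == f.1 && p.2 == f.2 then acc + 1 else acc) acc)
      = (fun (acc : Int) (p : Int × Int) => acc + (pvCounts _f2).getD (p.1, p.2) 0) := by
    funext acc p
    rw [pvInner_eq_count, Prod.mk.eta, pvCounts_getD]
  rw [hstep]
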